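-- pv_equiv track=rewrite | github.com/V-Rytham/Deterministic-Question-Engine | server/extraction/fact_extractor.py | _best_ner
-- ===== SOURCE A (Python) =====
-- from typing import Optional
--
-- def _best_ner(phrase: str, entities) -> Optional[str]:
--     if not phrase or not entities:
--         return None
--     pl = phrase.lower()
--     best_label = None
--     best_len = 0
--     for e in entities:
--         et = e["text"].lower()
--         if et in pl and len(et) > best_len:
--             best_label = e["label"]
--             best_len = len(et)
--     return best_label
-- ===== SOURCE B (Python) =====
-- def _best_ner(phrase, entities):
--     if not phrase or not entities:
--         return None
--     pl = phrase.lower()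
--     for e in sorted(entities, key=lambda e: len(e["text"].lower()), reverse=True):
--         et = e["text"].lower()
--         if et and et in pl:
--             return e["label"]
--     return None
-- ===== Notes on version B (the rewrite author's own statement) =====
-- stated objective: alternative
-- what changed: Replaces the running-max single pass with a stable sort of the entities by descending lowercased-text length followed by a first-match scan that returns early.
import Mathlib
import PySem

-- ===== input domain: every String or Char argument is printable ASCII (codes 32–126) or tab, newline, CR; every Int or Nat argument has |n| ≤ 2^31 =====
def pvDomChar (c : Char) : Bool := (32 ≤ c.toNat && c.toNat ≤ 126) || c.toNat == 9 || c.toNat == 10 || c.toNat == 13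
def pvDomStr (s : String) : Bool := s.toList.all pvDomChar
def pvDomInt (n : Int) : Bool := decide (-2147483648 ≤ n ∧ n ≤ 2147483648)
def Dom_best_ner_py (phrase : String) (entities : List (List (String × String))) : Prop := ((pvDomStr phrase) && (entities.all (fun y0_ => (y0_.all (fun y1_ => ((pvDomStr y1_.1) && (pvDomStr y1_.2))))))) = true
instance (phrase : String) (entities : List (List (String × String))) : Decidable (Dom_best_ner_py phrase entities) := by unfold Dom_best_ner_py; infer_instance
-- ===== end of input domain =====

-- B replaces A's running-max single pass by a stable descending-length sort plus a first-match scan (alternative algorithm, similar cost).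


-- ===== PORT A =====
def best_ner_py (phrase : String) (entities : List (List (String × String))) : Option String :=
  if phrase = "" ∨ entities = [] then none
  else
    let pl := PySem.Str.lower phrase
    (entities.foldl (fun st e =>
        let et := PySem.Str.lower ((PySem.Dict.mk e).getD "text" "")
        if PySem.Str.isIn et pl = true ∧ st.2 < PySem.Str.len et then
          (some ((PySem.Dict.mk e).getD "label" ""), PySem.Str.len et)
        else st)
      ((none : Option String), (0 : Int))).1

-- ===== PORT B =====
-- the for-loop with early return over the sorted list
def pvFirstMatch (pl : String) : List (List (String × String)) → Option String
  | [] => none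
  | e :: rest =>
    let et := PySem.Str.lower ((PySem.Dict.mk e).getD "text" "")
    if et ≠ "" ∧ PySem.Str.isIn et pl = true then some ((PySem.Dict.mk e).getD "label" "")
    else pvFirstMatch pl rest

def best_ner_py_alt (phrase : String) (entities : List (List (String × String))) : Option String :=
  if phrase = "" ∨ entities = [] then none
  else
    let pl := PySem.Str.lower phrase
    pvFirstMatch pl
      (PySem.List.sorted entities
        (fun e => PySem.Str.len (PySem.Str.lower ((PySem.Dict.mk e).getD "text" ""))) true)

-- ===== PRECONDITION & SPEC =====
-- Pre_ excludes exactly the inputs on which Python A raises KeyError: an entity missing "text",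
-- or an entity missing "label" whose nonempty lowered text occurs in the lowered phrase without any
-- earlier entity whose lowered text occurs there with at least that length (both ports totalize the
-- lookups with "", so outside Pre_ nothing is claimed).
def Pre_best_ner_py (phrase : String) (entities : List (List (String × String))) : Prop :=
  phrase = "" ∨ entities = [] ∨
    (List.range entities.length).all (fun i =>
      let e := entities.getD i []
      (PySem.Dict.mk e).contains "text" &&
      ((PySem.Dict.mk e).contains "label" ||
       decide (PySem.Str.lower ((PySem.Dict.mk e).getD "text" "") = "") ||
       !(PySem.Str.isIn (PySem.Str.lower ((PySem.Dict.mk e).getD "text" ""))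
           (PySem.Str.lower phrase)) ||
       (entities.take i).any (fun f =>
          (PySem.Dict.mk f).contains "text" &&
          PySem.Str.isIn (PySem.Str.lower ((PySem.Dict.mk f).getD "text" ""))
            (PySem.Str.lower phrase) &&
          decide (PySem.Str.len (PySem.Str.lower ((PySem.Dict.mk e).getD "text" ""))
            ≤ PySem.Str.len (PySem.Str.lower ((PySem.Dict.mk f).getD "text" "")))))) = true
instance (phrase : String) (entities : List (List (String × String))) : Decidable (Pre_best_ner_py phrase entities) := by unfold Pre_best_ner_py; infer_instance

def pvWitness_best_ner_py : String × (List (List (String × String))) :=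
  ("visit new york", [[("text", "York"), ("label", "GPE")], [("text", "new york"), ("label", "LOC")]])

def Spec_best_ner_py (phrase : String) (entities : List (List (String × String))) (out : Option String) : Prop := out = best_ner_py_alt phrase entities
instance (phrase : String) (entities : List (List (String × String))) (out : Option String) : Decidable (Spec_best_ner_py phrase entities out) := by unfold Spec_best_ner_py; infer_instance

-- ===== CLAIM (what is proved, stated in full; the proofs are below) =====
def Claim_equal_best_ner_py : Prop := ∀ (phrase : String) (entities : List (List (String × String))), Dom_best_ner_py phrase entities → Pre_best_ner_py phrase entities → Spec_best_ner_py phrase entities (best_ner_py phrase entities)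

-- ===== LEMMAS AND PROOFS =====

-- A's running-max scan, abstracted: `c` is the substring test, `k` the text length, `lab` the label.
def pvScan {α : Type} (k : α → Int) (c : α → Bool) : Int → List α → Option α
  | _, [] => none
  | bl, e :: rest =>
    if c e = true ∧ bl < k e then some ((pvScan k c (k e) rest).getD e)
    else pvScan k c bl rest

-- A's fold computes pvScan (generalized accumulator)
theorem pvFoldl_eq_scan {α : Type} (k : α → Int) (c : α → Bool) (lab : α → String) :
    ∀ (l : List α) (b : Option String) (bl : Int),
      l.foldl (fun st e => if c e = true ∧ st.2 < k e then (some (lab e), k e) else st) (b, bl)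
      = match pvScan k c bl l with
        | none => (b, bl)
        | some e => (some (lab e), k e) := by
  intro l
  induction l with
  | nil => intro b bl; rfl
  | cons e rest ih =>
    intro b bl
    by_cases h : c e = true ∧ bl < k e
    · simp only [List.foldl_cons, pvScan, if_pos h, ih]
      cases pvScan k c (k e) rest <;> rfl
    · simp only [List.foldl_cons, pvScan, if_neg h, ih]

theorem pvScan_append {α : Type} (k : α → Int) (c : α → Bool) (e : α) :
    ∀ (l : List α) (bl : Int),
      pvScan k c bl (l ++ [e])
      = match pvScan k c bl l with
        | none => if c e = true ∧ bl < k e then some e else none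
        | some e' => if c e = true ∧ k e' < k e then some e else some e' := by
  intro l
  induction l with
  | nil => intro bl; simp [pvScan]
  | cons f l ih =>
    intro bl
    by_cases h : c f = true ∧ bl < k f
    · simp only [List.cons_append, pvScan, if_pos h, ih (k f)]
      cases hs : pvScan k c (k f) l with
      | none =>
        by_cases he : c e = true ∧ k f < k e <;> simp [he]
      | some e' =>
        by_cases he : c e = true ∧ k e' < k e <;> simp [he]
    · simp only [List.cons_append, pvScan, if_neg h, ih bl]

-- inserting into a stable descending list: the new first match
theorem pvFind_insertBy {α : Type} (k : α → Int) (m : α → Bool) (e : α) :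
    ∀ (s : List α), s.Pairwise (fun a b => k b ≤ k a) →
      (PySem.List.insertBy (fun a b => decide (k b < k a)) e s).find? m
      = match s.find? m with
        | none => if m e = true then some e else none
        | some e' => if m e = true ∧ k e' < k e then some e else some e' := by
  intro s
  induction s with
  | nil =>
    intro _
    by_cases hme : m e = true <;> simp [PySem.List.insertBy, List.find?, hme]
  | cons y ys ih =>
    intro hp
    rcases List.pairwise_cons.mp hp with ⟨hy, hp'⟩
    by_cases hlt : k y < k e
    · -- e goes in front
      have : PySem.List.insertBy (fun a b => decide (k b < k a)) e (y :: ys) = e :: y :: ys := by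
        simp [PySem.List.insertBy, hlt]
      rw [this]
      by_cases hme : m e = true
      · rw [List.find?_cons_of_pos hme]
        cases hfind : (y :: ys).find? m with
        | none => simp [hme]
        | some e' =>
          have he' : e' ∈ y :: ys := List.mem_of_find?_eq_some hfind
          have hke' : k e' ≤ k y := by
            rcases List.mem_cons.mp he' with rfl | h
            · exact le_refl _
            · exact hy e' h
          simp [hme, lt_of_le_of_lt hke' hlt]
      · rw [List.find?_cons_of_neg (by simpa using hme)]
        cases hfind : (y :: ys).find? m with
        | none => simp [hme]
        | some e' => simp [hme]
    · -- e goes after y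
      have : PySem.List.insertBy (fun a b => decide (k b < k a)) e (y :: ys)
          = y :: PySem.List.insertBy (fun a b => decide (k b < k a)) e ys := by
        simp [PySem.List.insertBy, hlt]
      rw [this]
      by_cases hmy : m y = true
      · rw [List.find?_cons_of_pos hmy, List.find?_cons_of_pos hmy]
        simp [hlt]
      · rw [List.find?_cons_of_neg (by simpa using hmy), List.find?_cons_of_neg (by simpa using hmy),
          ih hp']

-- sort-then-first-match equals the running-max scan
theorem pvSorted_find_eq_scan {α : Type} (k : α → Int) (c : α → Bool)
    (hk : ∀ e, 0 ≤ k e) :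
    ∀ (l : List α),
      (PySem.List.sorted l k true).find? (fun e => c e && decide (0 < k e)) = pvScan k c 0 l := by
  intro l
  induction l using List.reverseRecOn with
  | nil => rfl
  | append_singleton l e ih =>
    have hsort : PySem.List.sorted (l ++ [e]) k true
        = PySem.List.insertBy (fun a b => decide (k b < k a)) e (PySem.List.sorted l k true) := by
      rw [PySem.List.sorted_rev_eq_foldl_insertBy, PySem.List.sorted_rev_eq_foldl_insertBy,
        List.foldl_append]
      rfl
    rw [hsort,
      pvFind_insertBy k _ e (PySem.List.sorted l k true) (PySem.List.sorted_pairwise_rev l k),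
      ih, pvScan_append]
    cases hs : pvScan k c 0 l with
    | none =>
      dsimp only
      by_cases hce : c e = true ∧ 0 < k e
      · rw [if_pos (show (c e && decide (0 < k e)) = true by simp [hce.1, hce.2]), if_pos hce]
      · rw [if_neg (show ¬(c e && decide (0 < k e)) = true by simpa using hce), if_neg hce]
    | some e' =>
      dsimp only
      by_cases hce : c e = true ∧ k e' < k e
      · have h0 := hk e'
        have h2 := hce.2
        have hcond : (c e && decide (0 < k e)) = true ∧ k e' < k e :=
          ⟨by rw [Bool.and_eq_true, decide_eq_true_eq]; exact ⟨hce.1, by omega⟩, h2⟩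
        rw [if_pos hcond, if_pos hce]
      · have hncond : ¬((c e && decide (0 < k e)) = true ∧ k e' < k e) := by
          intro ⟨h1, h2⟩
          rw [Bool.and_eq_true, decide_eq_true_eq] at h1
          exact hce ⟨h1.1, h2⟩
        rw [if_neg hncond, if_neg hce]

-- B's loop is find? then label
theorem pvFirstMatch_eq_find (pl : String) :
    ∀ (l : List (List (String × String))),
      pvFirstMatch pl l
      = (l.find? (fun e =>
            decide (PySem.Str.lower ((PySem.Dict.mk e).getD "text" "") ≠ "") &&
            PySem.Str.isIn (PySem.Str.lower ((PySem.Dict.mk e).getD "text" "")) pl)).map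
          (fun e => (PySem.Dict.mk e).getD "label" "") := by
  intro l
  induction l with
  | nil => rfl
  | cons e rest ih =>
    have hstep : pvFirstMatch pl (e :: rest)
        = if PySem.Str.lower ((PySem.Dict.mk e).getD "text" "") ≠ ""
              ∧ PySem.Str.isIn (PySem.Str.lower ((PySem.Dict.mk e).getD "text" "")) pl = true
          then some ((PySem.Dict.mk e).getD "label" "")
          else pvFirstMatch pl rest := rfl
    rw [hstep]
    by_cases h : PySem.Str.lower ((PySem.Dict.mk e).getD "text" "") ≠ ""
        ∧ PySem.Str.isIn (PySem.Str.lower ((PySem.Dict.mk e).getD "text" "")) pl = true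
    · rw [if_pos h,
        List.find?_cons_of_pos (by simp only [Bool.and_eq_true, decide_eq_true_eq]; exact h)]
      rfl
    · rw [if_neg h, ih,
        List.find?_cons_of_neg (by simp only [Bool.and_eq_true, decide_eq_true_eq]; exact h)]

-- a string is nonempty iff its PySem length is positive
theorem pvLen_pos_iff (s : String) : 0 < PySem.Str.len s ↔ s ≠ "" := by
  rw [PySem.Str.len_eq]
  constructor
  · intro h hs; subst hs; simp at h
  · intro h
    have hne : s.toList ≠ [] := fun hn => h (by
      have h2 := congrArg String.ofList hn
      simpa using h2)
    have : 0 < s.toList.length := List.length_pos_iff.mpr hne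
    exact_mod_cast this

-- ===== VERDICT (by name: the statement is the Claim_ definition above) =====
theorem best_ner_py_spec : Claim_equal_best_ner_py := by
  intro phrase entities _ _
  unfold Spec_best_ner_py best_ner_py best_ner_py_alt
  by_cases hg : phrase = "" ∨ entities = []
  · simp [hg]
  · simp only [if_neg hg]
    set pl := PySem.Str.lower phrase with hpl
    set k : List (String × String) → Int :=
      fun e => PySem.Str.len (PySem.Str.lower ((PySem.Dict.mk e).getD "text" "")) with hk
    set c : List (String × String) → Bool :=
      fun e => PySem.Str.isIn (PySem.Str.lower ((PySem.Dict.mk e).getD "text" "")) pl with hc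
    set lab : List (String × String) → String :=
      fun e => (PySem.Dict.mk e).getD "label" "" with hlab
    have hA : (entities.foldl (fun st e =>
          if c e = true ∧ st.2 < k e then (some (lab e), k e) else st)
          ((none : Option String), (0 : Int))).1
        = match pvScan k c 0 entities with
          | none => none
          | some e => some (lab e) := by
      rw [pvFoldl_eq_scan k c lab entities none 0]
      cases pvScan k c 0 entities <;> rfl
    have hknn : ∀ e, 0 ≤ k e := by
      intro e; rw [hk]; simp only [PySem.Str.len_eq]; positivity
    have hfind : (PySem.List.sorted entities k true).find? (fun e => c e && decide (0 < k e))
        = pvScan k c 0 entities := pvSorted_find_eq_scan k c hknn entities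
    have hpred : (fun e => decide (PySem.Str.lower ((PySem.Dict.mk e).getD "text" "") ≠ "") &&
          PySem.Str.isIn (PySem.Str.lower ((PySem.Dict.mk e).getD "text" "")) pl)
        = (fun e => c e && decide (0 < k e)) := by
      funext e
      rw [hc, hk]
      rw [decide_eq_decide.mpr (pvLen_pos_iff (PySem.Str.lower ((PySem.Dict.mk e).getD "text" "")))]
      rw [Bool.and_comm]
    calc (entities.foldl (fun st e =>
          if c e = true ∧ st.2 < k e then (some (lab e), k e) else st)
          ((none : Option String), (0 : Int))).1
        = match pvScan k c 0 entities with
          | none => none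
          | some e => some (lab e) := hA
      _ = (pvScan k c 0 entities).map lab := by cases pvScan k c 0 entities <;> rfl
      _ = ((PySem.List.sorted entities k true).find? (fun e => c e && decide (0 < k e))).map lab := by
          rw [hfind]
      _ = pvFirstMatch pl (PySem.List.sorted entities k true) := by
          rw [pvFirstMatch_eq_find, hpred]
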